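-- pv_equiv track=rewrite | github.com/Linermao/ecoa-tools | app/services/distributed_debug.py | _service_name_by_host
-- ===== SOURCE A (Python) =====
-- from typing import Dict, List, Optional
--
-- def _sanitize_service_name(node_id: str) -> str:
--     return "".join(character if character.isalnum() else "-" for character in node_id.lower()).strip("-")
--
-- def _service_name_by_host(node_hosts: Dict[str, str]) -> Dict[str, str]:
--     grouped_nodes: Dict[str, List[str]] = {}
--     for node_id, host in node_hosts.items():
--         grouped_nodes.setdefault(host, []).append(node_id)
--
--     service_names: Dict[str, str] = {}
--     for host, node_ids in grouped_nodes.items():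
--         preferred_node_id = next((node_id for node_id in node_ids if node_id != "main"), node_ids[0])
--         service_names[host] = f"ecoa-{_sanitize_service_name(preferred_node_id)}"
--     return service_names
-- ===== SOURCE B (Python) =====
-- def _sanitize_service_name(node_id: str) -> str:
--     return "".join(character if character.isalnum() else "-" for character in node_id.lower()).strip("-")
--
-- def _service_name_by_host(node_hosts):
--     chosen = {}
--     for node_id, host in node_hosts.items():
--         if host not in chosen:
--             chosen[host] = node_id
--         elif chosen[host] == "main" and node_id != "main":
--             chosen[host] = node_id
--     return {host: f"ecoa-{_sanitize_service_name(nid)}" for host, nid in chosen.items()}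
-- ===== Notes on version B (the rewrite author's own statement) =====
-- stated objective: simpler
-- what changed: Replaces A's two-pass group-by-host-then-select structure (building host->list-of-nodes and scanning each list) with a single pass that keeps only the currently chosen node per host (first non-'main' node, else the first node), so no per-host lists are built.
import Mathlib
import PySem

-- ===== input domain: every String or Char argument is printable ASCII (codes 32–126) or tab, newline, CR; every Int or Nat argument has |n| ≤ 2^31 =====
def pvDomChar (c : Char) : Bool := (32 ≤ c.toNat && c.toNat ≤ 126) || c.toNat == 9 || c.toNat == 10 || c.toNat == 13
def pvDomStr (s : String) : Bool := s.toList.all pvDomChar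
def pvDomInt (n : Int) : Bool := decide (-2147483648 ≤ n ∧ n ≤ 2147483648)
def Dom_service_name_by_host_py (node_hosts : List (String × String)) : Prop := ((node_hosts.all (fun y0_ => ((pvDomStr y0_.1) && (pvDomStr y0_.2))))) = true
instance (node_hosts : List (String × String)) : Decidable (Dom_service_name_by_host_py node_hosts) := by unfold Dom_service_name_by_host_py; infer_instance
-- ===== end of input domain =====

-- B replaces A's group-then-select two-pass structure with a single pass keeping one chosen node per host; same return value, objective: simpler.

-- shared helper: port of _sanitize_service_name (used verbatim by both Pythons)
def pvSanitize (node_id : String) : String :=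
  PySem.Str.stripChars
    (String.ofList ((PySem.Str.lower node_id).toList.map
      (fun c => if PySem.Chars.isalnum c then c else '-')))
    "-"

-- ===== PORT A =====
-- next((n for n in node_ids if n != "main"), node_ids[0]); node_ids is never empty
-- (every group gets at least one append), so node_ids[0] is ported as headD "".
def pvPreferred (node_ids : List String) : String :=
  match node_ids.find? (fun n => !(n == "main")) with
  | some n => n
  | none => node_ids.headD ""

def service_name_by_host_py (node_hosts : List (String × String)) : List (String × String) :=
  let grouped : PySem.Dict String (List String) :=
    node_hosts.foldl (fun d p => d.modify p.2 [] (fun l => l ++ [p.1])) PySem.Dict.empty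
  let service_names : PySem.Dict String String :=
    grouped.items.foldl
      (fun d q => d.insert q.1 ("ecoa-" ++ pvSanitize (pvPreferred q.2)))
      PySem.Dict.empty
  service_names.items

-- ===== PORT B =====
def service_name_by_host_py_alt (node_hosts : List (String × String)) : List (String × String) :=
  let chosen : PySem.Dict String String :=
    node_hosts.foldl
      (fun d p =>
        if d.contains p.2 = false then d.insert p.2 p.1
        else if d.getD p.2 "" == "main" && !(p.1 == "main") then d.insert p.2 p.1
        else d)
      PySem.Dict.empty
  chosen.items.map (fun q => (q.1, "ecoa-" ++ pvSanitize q.2))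

-- ===== PRECONDITION & SPEC =====
def Spec_service_name_by_host_py (node_hosts : List (String × String)) (out : List (String × String)) : Prop := out = service_name_by_host_py_alt node_hosts
instance (node_hosts : List (String × String)) (out : List (String × String)) : Decidable (Spec_service_name_by_host_py node_hosts out) := by unfold Spec_service_name_by_host_py; infer_instance

-- ===== CLAIM (what is proved, stated in full; the proofs are below) =====
def Claim_equal_service_name_by_host_py : Prop := ∀ (node_hosts : List (String × String)), Dom_service_name_by_host_py node_hosts → Spec_service_name_by_host_py node_hosts (service_name_by_host_py node_hosts)

-- ===== LEMMAS AND PROOFS =====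

-- the hosts in first-occurrence order
def pvHosts (l : List (String × String)) : List String :=
  PySem.Set.ofList (l.map (fun p => p.2))

-- the node ids mapped to host h, in order
def pvGrp (l : List (String × String)) (h : String) : List String :=
  (l.filter (fun p => p.2 == h)).map (fun p => p.1)

theorem pvPreferred_singleton (x : String) : pvPreferred [x] = x := by
  cases hx : (x == "main")
  · simp [pvPreferred, List.find?, hx]
  · have : x = "main" := by simpa using hx
    simp [pvPreferred, List.find?, this]

theorem pvPreferred_append (ids : List String) (x : String) (hne : ids ≠ []) :
    pvPreferred (ids ++ [x])
      = if pvPreferred ids == "main" && !(x == "main") then x else pvPreferred ids := by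
  unfold pvPreferred
  rw [List.find?_append]
  cases hfind : ids.find? (fun n => !(n == "main")) with
  | some n =>
      have hn := List.find?_some hfind
      have hnb : (n == "main") = false := by
        cases hnb : (n == "main") <;> simp [hnb] at hn ⊢
      simp [Option.or, hnb]
  | none =>
      have hall : ∀ a ∈ ids, ¬ ((!(a == "main")) = true) := by
        rw [← List.find?_eq_none]; exact hfind
      obtain ⟨i, t, rfl⟩ : ∃ i t, ids = i :: t := by
        cases ids with
        | nil => exact absurd rfl hne
        | cons i t => exact ⟨i, t, rfl⟩
      have hi : i = "main" := by
        have := hall i (by simp)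
        simpa using this
      cases hx : (x == "main")
      · simp [List.find?, hx, hi]
      · have : x = "main" := by simpa using hx
        simp [List.find?, hi, this]

theorem pvGrp_append (l : List (String × String)) (p : String × String) (h : String) :
    pvGrp (l ++ [p]) h = pvGrp l h ++ (if p.2 == h then [p.1] else []) := by
  by_cases hp : p.2 = h
  · simp [pvGrp, List.filter_append, List.filter, hp]
  · have hb : (p.2 == h) = false := beq_eq_false_iff_ne.mpr hp
    simp [pvGrp, List.filter_append, List.filter, hb]

theorem mem_pvHosts (l : List (String × String)) (h : String) :
    h ∈ pvHosts l ↔ ∃ p ∈ l, p.2 = h := by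
  simp [pvHosts, PySem.Set.mem_ofList]

theorem pvGrp_ne_nil {l : List (String × String)} {h : String} (hm : h ∈ pvHosts l) :
    pvGrp l h ≠ [] := by
  obtain ⟨p, hp, hph⟩ := (mem_pvHosts l h).mp hm
  have : p.1 ∈ pvGrp l h := by
    simp only [pvGrp]
    exact List.mem_map_of_mem (List.mem_filter.mpr ⟨hp, by simp [hph]⟩)
  exact List.ne_nil_of_mem this

theorem pvGrp_of_not_mem {l : List (String × String)} {h : String} (hm : h ∉ pvHosts l) :
    pvGrp l h = [] := by
  simp only [pvGrp, List.map_eq_nil_iff, List.filter_eq_nil_iff]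
  intro p hp hph
  exact hm ((mem_pvHosts l h).mpr ⟨p, hp, by simpa using hph⟩)

-- characterization of B's single-pass fold
theorem alt_chosen (l : List (String × String)) :
    (l.foldl
      (fun d p =>
        if d.contains p.2 = false then d.insert p.2 p.1
        else if d.getD p.2 "" == "main" && !(p.1 == "main") then d.insert p.2 p.1
        else d)
      PySem.Dict.empty).items
      = (pvHosts l).map (fun h => (h, pvPreferred (pvGrp l h))) := by
  induction l using List.reverseRecOn with
  | nil => rfl
  | append_singleton l p ih =>
    simp only [List.foldl_append, List.foldl_cons, List.foldl_nil]
    set d := l.foldl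
      (fun d p =>
        if d.contains p.2 = false then d.insert p.2 p.1
        else if d.getD p.2 "" == "main" && !(p.1 == "main") then d.insert p.2 p.1
        else d)
      PySem.Dict.empty with hd
    have hkeys : d.keys = pvHosts l := by
      show d.items.map (fun q => q.1) = pvHosts l
      rw [ih, List.map_map]; simp [Function.comp_def]
    have hnodup : d.keys.Nodup := by rw [hkeys]; exact PySem.Set.nodup_ofList _
    have hosts_eq : pvHosts (l ++ [p]) = PySem.Set.add (pvHosts l) p.2 := by
      simp only [pvHosts, List.map_append, List.map_cons, List.map_nil]
      exact PySem.Set.ofList_append_singleton _ _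
    by_cases hm : p.2 ∈ pvHosts l
    · have hc : d.contains p.2 = true :=
        (PySem.Dict.contains_iff_mem_keys d p.2).mpr (by rw [hkeys]; exact hm)
      have hitem : (p.2, pvPreferred (pvGrp l p.2)) ∈ d.items := by
        rw [ih]; exact List.mem_map_of_mem hm
      have hget : d.getD p.2 "" = pvPreferred (pvGrp l p.2) :=
        PySem.Dict.getD_of_mem_items d hitem hnodup ""
      rw [hosts_eq, PySem.Set.add_of_mem hm,
        if_neg (show ¬(d.contains p.2 = false) by rw [hc]; decide), hget]
      cases hcond : (pvPreferred (pvGrp l p.2) == "main" && !(p.1 == "main")) with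
      | true =>
          rw [if_pos rfl, PySem.Dict.items_insert_of_contains d p.1 hc, ih, List.map_map]
          apply List.map_congr_left
          intro h hh
          by_cases hhp : h = p.2
          · subst hhp
            have hgrp : pvGrp (l ++ [p]) p.2 = pvGrp l p.2 ++ [p.1] := by
              rw [pvGrp_append]; simp
            simp [hgrp, pvPreferred_append _ _ (pvGrp_ne_nil hm), hcond]
          · have hgrp : pvGrp (l ++ [p]) h = pvGrp l h := by
              rw [pvGrp_append]
              simp [beq_eq_false_iff_ne.mpr (Ne.symm hhp)]
            simp [hgrp, hhp]
      | false =>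
          rw [if_neg (by decide : ¬(false = true)), ih]
          apply List.map_congr_left
          intro h hh
          by_cases hhp : h = p.2
          · subst hhp
            have hgrp : pvGrp (l ++ [p]) p.2 = pvGrp l p.2 ++ [p.1] := by
              rw [pvGrp_append]; simp
            simp [hgrp, pvPreferred_append _ _ (pvGrp_ne_nil hm), hcond]
          · have hgrp : pvGrp (l ++ [p]) h = pvGrp l h := by
              rw [pvGrp_append]
              simp [beq_eq_false_iff_ne.mpr (Ne.symm hhp)]
            rw [hgrp]
    · have hc : d.contains p.2 = false := by
        cases hcb : d.contains p.2
        · rfl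
        · exact absurd ((PySem.Dict.contains_iff_mem_keys d p.2).mp hcb)
            (by rw [hkeys]; exact hm)
      rw [if_pos hc, PySem.Dict.items_insert_of_not_contains d p.1 hc, ih,
        hosts_eq, PySem.Set.add_of_not_mem hm, List.map_append]
      congr 1
      · apply List.map_congr_left
        intro h hh
        have hhp : h ≠ p.2 := fun e => hm (e ▸ hh)
        have hgrp : pvGrp (l ++ [p]) h = pvGrp l h := by
          rw [pvGrp_append]
          simp [beq_eq_false_iff_ne.mpr (Ne.symm hhp)]
        rw [hgrp]
      · have hgrp : pvGrp (l ++ [p]) p.2 = [p.1] := by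
          rw [pvGrp_append, pvGrp_of_not_mem hm]; simp
        simp [hgrp, pvPreferred_singleton]

-- characterization of A's group-then-select passes
theorem a_char (l : List (String × String)) :
    service_name_by_host_py l
      = (pvHosts l).map (fun h => (h, "ecoa-" ++ pvSanitize (pvPreferred (pvGrp l h)))) := by
  unfold service_name_by_host_py
  set grouped : PySem.Dict String (List String) :=
    l.foldl (fun d p => d.modify p.2 [] (fun xs => xs ++ [p.1])) PySem.Dict.empty with hg
  have hkeys : grouped.keys = pvHosts l := by
    rw [hg, PySem.Dict.keys_foldl_modify_key l (fun p => p.2) []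
      (fun _ p => fun xs => xs ++ [p.1]) PySem.Dict.empty]
    simp [pvHosts, PySem.Set.update_nil_left, PySem.Dict.keys_empty]
  have hnodup : grouped.keys.Nodup := by rw [hkeys]; exact PySem.Set.nodup_ofList _
  have hgetD : ∀ h, grouped.getD h [] = pvGrp l h := by
    intro h
    have hswap : grouped
        = (l.map (fun p => (p.2, p.1))).foldl
            (fun d p => d.modify p.1 [] (fun xs => xs ++ [p.2])) PySem.Dict.empty := by
      rw [hg, List.foldl_map]
    rw [hswap, PySem.Dict.getD_foldl_modify_append]
    rw [PySem.Dict.getD_empty, List.nil_append, List.filter_map, List.map_map]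
    simp [pvGrp, Function.comp_def]
  have hitems : grouped.items = (pvHosts l).map (fun h => (h, pvGrp l h)) := by
    rw [PySem.Dict.items_eq_map_keys grouped hnodup [], hkeys]
    apply List.map_congr_left
    intro h _
    rw [hgetD]
  rw [PySem.Dict.items_foldl_insert_fresh grouped.items (fun q => q.1)
    (fun q => "ecoa-" ++ pvSanitize (pvPreferred q.2)) PySem.Dict.empty
    (fun a _ => PySem.Dict.contains_empty _)
    (by show (grouped.items.map (fun q => q.1)).Nodup; exact hnodup)]
  rw [show (PySem.Dict.empty : PySem.Dict String String).items = [] from rfl,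
    List.nil_append, hitems, List.map_map]
  rfl

-- ===== VERDICT (by name: the statement is the Claim_ definition above) =====
theorem service_name_by_host_py_spec : Claim_equal_service_name_by_host_py := by
  intro l _
  show service_name_by_host_py l = service_name_by_host_py_alt l
  simp only [service_name_by_host_py_alt]
  rw [alt_chosen l, List.map_map, a_char l]
  rfl
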